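-- pv_equiv track=rewrite | github.com/buck06191/advent-of-code-2025 | src/aoc/day3.py | highest_pairing
-- ===== SOURCE A (Python) =====
-- def highest_pairing(batteries: list[int]) -> int:
--     highest = 0
--     second_highest = 0
--     for idx, battery in enumerate(batteries):
--         if battery > highest and idx != len(batteries) - 1:
--             highest = battery
--             second_highest = 0
--             continue
--         if battery > second_highest:
--             second_highest = battery
--             continue
--
--     return int(f"{highest}{second_highest}")
-- ===== SOURCE B (Python) =====
-- def highest_pairing(batteries: list[int]) -> int:
--     prefix = batteries[:-1]
--     highest = max([0] + prefix)
--     h = prefix.index(highest) if highest > 0 else -1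
--     second = max([0] + batteries[h + 1:])
--     return int(f"{highest}{second}")
-- ===== Notes on version B (the rewrite author's own statement) =====
-- stated objective: alternative
-- what changed: Replaces A's single resetting-state scan (running highest with second reset on each update) by a find-split decomposition: max of the prefix, locate its first occurrence, then max of the suffix after that point.
import Mathlib
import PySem

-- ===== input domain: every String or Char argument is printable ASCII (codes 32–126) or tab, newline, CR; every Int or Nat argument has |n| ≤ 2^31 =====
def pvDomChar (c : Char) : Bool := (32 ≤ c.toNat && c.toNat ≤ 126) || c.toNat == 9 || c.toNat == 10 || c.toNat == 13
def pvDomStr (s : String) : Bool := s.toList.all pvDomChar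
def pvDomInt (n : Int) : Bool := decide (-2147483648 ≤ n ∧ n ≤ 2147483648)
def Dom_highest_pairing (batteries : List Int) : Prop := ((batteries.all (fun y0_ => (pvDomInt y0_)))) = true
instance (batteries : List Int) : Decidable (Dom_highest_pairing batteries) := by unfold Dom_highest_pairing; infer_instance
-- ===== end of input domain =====

-- B replaces A's single resetting-state scan by a find-split decomposition (prefix max,
-- first occurrence, suffix max); alternative structure, same O(n) cost.


-- ===== PORT A =====
-- loop body of A: state (highest, second_highest), one enumerated element (idx, battery)
def hpStepIdx (n : Int) (p : Int × Int) (ib : Int × Int) : Int × Int :=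
  if ib.2 > p.1 ∧ ib.1 ≠ n - 1 then (ib.2, 0)
  else if ib.2 > p.2 then (p.1, ib.2) else p

-- int(f"{highest}{second}") — the parse always succeeds (both components are str(int)), so getD 0 is never the default
def hpFinal (p : Int × Int) : Int :=
  (PySem.Int.ofChars? (PySem.Int.toChars p.1 ++ PySem.Int.toChars p.2)).getD 0

def highest_pairing (batteries : List Int) : Int :=
  let st := (PySem.List.enumerate batteries 0).foldl (hpStepIdx (batteries.length : Int)) (0, 0)
  hpFinal st

-- ===== PORT B =====
def highest_pairing_alt (batteries : List Int) : Int :=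
  let pfx := PySem.List.slice batteries none (some (-1))                     -- batteries[:-1]
  let highest := (PySem.List.max? ((0 : Int) :: pfx) (fun y => y)).getD 0    -- max([0] + pfx)
  -- pfx = batteries[:-1]; prefix.index(highest): never raises when highest > 0 (highest is then an element of prefix)
  let h : Int := if highest > 0 then ((PySem.List.index? pfx highest).getD 0 : Nat) else -1
  let second := (PySem.List.max? ((0 : Int) :: PySem.List.slice batteries (some (h + 1)) none) (fun y => y)).getD 0
  hpFinal (highest, second)

-- ===== PRECONDITION & SPEC =====
def Spec_highest_pairing (batteries : List Int) (out : Int) : Prop := out = highest_pairing_alt batteries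
instance (batteries : List Int) (out : Int) : Decidable (Spec_highest_pairing batteries out) := by unfold Spec_highest_pairing; infer_instance

-- ===== CLAIM (what is proved, stated in full; the proofs are below) =====
def Claim_equal_highest_pairing : Prop := ∀ (batteries : List Int), Dom_highest_pairing batteries → Spec_highest_pairing batteries (highest_pairing batteries)

-- ===== LEMMAS AND PROOFS =====

-- the index-free loop body (A's body when idx is not the last index)
def hpStep (p : Int × Int) (b : Int) : Int × Int :=
  if b > p.1 then (b, 0) else if b > p.2 then (p.1, b) else p

def hpH (l : List Int) : Int := l.foldl max 0
def hpSplit (l : List Int) : Nat :=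
  if 0 < hpH l then (PySem.List.index? l (hpH l)).getD 0 + 1 else 0
def hpS (l : List Int) : Int := (l.drop (hpSplit l)).foldl max 0

theorem hpH_nonneg (l : List Int) : 0 ≤ hpH l := (PySem.List.le_foldl_max l 0).1

theorem hpH_concat (l : List Int) (x : Int) : hpH (l ++ [x]) = max (hpH l) x := by
  simp [hpH, List.foldl_append]

theorem mem_le_hpH (l : List Int) (y : Int) (hy : y ∈ l) : y ≤ hpH l :=
  (PySem.List.le_foldl_max l 0).2 y hy

theorem hpH_mem_of_pos (l : List Int) (hp : 0 < hpH l) : hpH l ∈ l := by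
  rcases PySem.List.foldl_max_mem l 0 with h0 | h0
  · exfalso; rw [hpH] at hp; omega
  · exact h0

theorem hpS_nonneg (l : List Int) : 0 ≤ hpS l := (PySem.List.le_foldl_max _ 0).1

theorem hpfold_eq (l : List Int) : l.foldl hpStep (0, 0) = (hpH l, hpS l) := by
  induction l using List.reverseRecOn with
  | nil => simp [hpH, hpS, hpSplit]
  | append_singleton l x ih =>
    rw [List.foldl_append, ih]
    simp only [List.foldl_cons, List.foldl_nil]
    by_cases hx : x > hpH l
    · have hnm : x ∉ l := fun hmem => absurd (mem_le_hpH l x hmem) (by omega)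
      have hH : hpH (l ++ [x]) = x := by rw [hpH_concat]; omega
      have hpos : 0 < hpH (l ++ [x]) := by rw [hH]; have := hpH_nonneg l; omega
      have hidx : PySem.List.index? (l ++ [x]) (hpH (l ++ [x])) = some l.length := by
        rw [hH]; exact PySem.List.index?_append_singleton_self l x hnm
      have hsplit : hpSplit (l ++ [x]) = l.length + 1 := by
        unfold hpSplit; rw [if_pos hpos, hidx]; rfl
      have hS : hpS (l ++ [x]) = 0 := by
        unfold hpS; rw [hsplit, List.drop_eq_nil_of_le (by simp)]; rfl
      simp [hpStep, hx, hH, hS]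
    · have hH : hpH (l ++ [x]) = hpH l := by rw [hpH_concat]; omega
      by_cases hp : 0 < hpH l
      · have hmem : hpH l ∈ l := hpH_mem_of_pos l hp
        obtain ⟨k, hk⟩ := Option.isSome_iff_exists.mp
          ((PySem.List.index?_isSome_iff l (hpH l)).mpr hmem)
        obtain ⟨hklen, -, -⟩ := PySem.List.getElem_of_index?_eq_some hk
        have hidx : PySem.List.index? (l ++ [x]) (hpH l) = some k := by
          rw [PySem.List.index?_append_of_mem _ hmem, hk]
        have hsplit : hpSplit (l ++ [x]) = k + 1 := by
          unfold hpSplit; rw [hH, if_pos hp, hidx]; rfl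
        have hsplit' : hpSplit l = k + 1 := by
          unfold hpSplit; rw [if_pos hp, hk]; rfl
        have hdrop : (l ++ [x]).drop (k + 1) = l.drop (k + 1) ++ [x] :=
          List.drop_append_of_le_length (by omega)
        have hS : hpS (l ++ [x]) = max (hpS l) x := by
          rw [hpS, hsplit, hdrop, List.foldl_append, hpS, hsplit']
          simp
        have hS0 : 0 ≤ hpS l := hpS_nonneg l
        by_cases hs : x > hpS l <;>
          simp [hpStep, hx, hs, hH, hS, max_def] <;> omega
      · have h0 : hpH l = 0 := by have := hpH_nonneg l; omega
        have hxle : ¬ (0 : Int) < x := by omega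
        have hsplit : hpSplit (l ++ [x]) = 0 := by unfold hpSplit; rw [hH]; simp [h0]
        have hsplit' : hpSplit l = 0 := by unfold hpSplit; simp [h0]
        have hS' : hpS l = 0 := by
          rw [hpS, hsplit', List.drop_zero, ← hpH, h0]
        have hS : hpS (l ++ [x]) = 0 := by
          rw [hpS, hsplit, List.drop_zero, List.foldl_append, ← hpH, h0]
          simp; omega
        simp [hpStep, h0, hS', hxle, hH, hS]

-- A's enumerated fold on l ++ [x]: every index of l is ≠ n-1, the last index equals n-1
theorem hpA_concat (l : List Int) (x : Int) :
    (PySem.List.enumerate (l ++ [x]) 0).foldl (hpStepIdx ((l ++ [x]).length : Int)) (0, 0)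
      = (hpH l, if x > hpS l then x else hpS l) := by
  rw [PySem.List.enumerate_append, List.foldl_append]
  have hcong : (PySem.List.enumerate l 0).foldl (hpStepIdx ((l ++ [x]).length : Int)) (0, 0)
      = (PySem.List.enumerate l 0).foldl (fun p ib => hpStep p ib.2) (0, 0) := by
    apply PySem.List.foldl_congr_mem
    intro acc p hp
    obtain ⟨k, hk, hpk⟩ := (PySem.List.mem_enumerate_iff l 0 p).mp hp
    subst hpk
    simp [hpStepIdx, hpStep, List.length_append, Nat.ne_of_lt hk]
  have h2 : (PySem.List.enumerate l 0).foldl (fun p (ib : Int × Int) => hpStep p ib.2) (0, 0)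
      = l.foldl hpStep (0, 0) := by
    conv_rhs => rw [← PySem.List.map_snd_enumerate l 0]
    rw [List.foldl_map]
  rw [hcong, h2, hpfold_eq]
  have hlast : ((0 : Int) + (l.length : Int)) = ((l ++ [x]).length : Int) - 1 := by
    simp only [List.length_append, List.length_cons, List.length_nil]
    push_cast; omega
  simp only [PySem.List.enumerate_cons, PySem.List.enumerate_nil, List.foldl_cons,
    List.foldl_nil, hpStepIdx, hlast, ne_eq, not_true_eq_false, and_false, if_false]
  by_cases hs : x > hpS l <;> simp [hs]

-- B's components on l ++ [x] are the same pair
theorem hpB_concat (l : List Int) (x : Int) :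
    highest_pairing_alt (l ++ [x]) = hpFinal (hpH l, if x > hpS l then x else hpS l) := by
  simp only [highest_pairing_alt]
  rw [PySem.List.slice_to_neg_one, List.dropLast_concat]
  rw [PySem.List.max?_id_cons]
  simp only [Option.getD_some]
  rw [show (List.foldl max 0 l) = hpH l from rfl]
  by_cases hp : (0 : Int) < hpH l
  · have hmem : hpH l ∈ l := hpH_mem_of_pos l hp
    obtain ⟨k, hk⟩ := Option.isSome_iff_exists.mp
      ((PySem.List.index?_isSome_iff l (hpH l)).mpr hmem)
    obtain ⟨hklen, -, -⟩ := PySem.List.getElem_of_index?_eq_some hk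
    have hsplit : hpSplit l = k + 1 := by unfold hpSplit; rw [if_pos hp, hk]; rfl
    rw [show ((if hpH l > 0 then ((PySem.List.index? l (hpH l)).getD 0 : Nat) else -1 : Int))
        = (k : Int) by rw [if_pos hp, hk]; rfl]
    have hslice : PySem.List.slice (l ++ [x]) (some ((k : Int) + 1)) none
        = l.drop (k + 1) ++ [x] := by
      rw [show ((k : Int) + 1) = ((k + 1 : Nat) : Int) by push_cast; ring,
        PySem.List.slice_from_natCast]
      exact List.drop_append_of_le_length (by omega)
    rw [hslice, PySem.List.max?_id_cons]
    simp only [Option.getD_some]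
    have hS' : hpS l = (l.drop (k + 1)).foldl max 0 := by rw [hpS, hsplit]
    rw [List.foldl_append, ← hS']
    have h0 : 0 ≤ hpS l := hpS_nonneg l
    congr 1
    simp only [List.foldl_cons, List.foldl_nil]
    by_cases hs : x > hpS l <;> simp [hs, max_def] <;> omega
  · have h0 : hpH l = 0 := by have := hpH_nonneg l; omega
    rw [show ((if hpH l > 0 then ((PySem.List.index? l (hpH l)).getD 0 : Nat) else -1 : Int))
        = -1 by rw [if_neg hp]]
    have hslice : PySem.List.slice (l ++ [x]) (some ((-1 : Int) + 1)) none = l ++ [x] := by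
      rw [show ((-1 : Int) + 1) = ((0 : Nat) : Int) by norm_num,
        PySem.List.slice_from_natCast, List.drop_zero]
    rw [hslice, PySem.List.max?_id_cons]
    simp only [Option.getD_some]
    have hS' : hpS l = 0 := by
      rw [hpS, hpSplit, if_neg hp, List.drop_zero, ← hpH, h0]
    rw [List.foldl_append, ← hpH, h0, hS']
    congr 1
    simp only [List.foldl_cons, List.foldl_nil]
    by_cases hs : x > (0:Int) <;> simp [hs, max_def] <;> omega

-- ===== VERDICT (by name: the statement is the Claim_ definition above) =====
theorem highest_pairing_spec : Claim_equal_highest_pairing := by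
  intro batteries _
  unfold Spec_highest_pairing
  induction batteries using List.reverseRecOn with
  | nil => rfl
  | append_singleton l x _ =>
    rw [highest_pairing, hpA_concat, hpB_concat]
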